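-- pv_equiv track=rewrite | github.com/rafix7742/CREATE-csca08-f24 | filewriting.py | palindrome_names
-- ===== SOURCE A (Python) =====
-- from typing import List, TextIO, Tuple
--
-- def palindrome_names(names: List[str]) -> list:
--
--     name_list = []
--     # Alternate solution\
--     # I dont expect anyone to get this but it is a really nice trick with string splicing
--     # for name in names:
--     #     if name.lower() == name.lower()[::-1]:
--     #         name_list.append(name)
--     # return name_list
--
--     for name in names:
--         # lower case and create the reverse name
--         lower_name = name.lower()
--         reversed_name = ""
--         index = len(lower_name) - 1
--         while index >= 0:
--             reversed_name += lower_name[index]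
--             index -= 1
--         # if they're equal, great add it to the list
--         if lower_name == reversed_name:
--             name_list.append(name)
--
--     return name_list
-- ===== SOURCE B (Python) =====
-- def palindrome_names(names):
--     def is_pal(low):
--         i, j = 0, len(low) - 1
--         while i < j:
--             if low[i] != low[j]:
--                 return False
--             i += 1
--             j -= 1
--         return True
--     return [name for name in names if is_pal(name.lower())]
-- ===== Notes on version B (the rewrite author's own statement) =====
-- stated objective: idiomatic
-- what changed: Replaced the reversed-string construction (char-by-char concatenation loop plus full-string comparison) with an in-place two-pointer inward scan that early-exits on the first mismatch, and the accumulator loop with a filtering comprehension.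
import Mathlib
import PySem

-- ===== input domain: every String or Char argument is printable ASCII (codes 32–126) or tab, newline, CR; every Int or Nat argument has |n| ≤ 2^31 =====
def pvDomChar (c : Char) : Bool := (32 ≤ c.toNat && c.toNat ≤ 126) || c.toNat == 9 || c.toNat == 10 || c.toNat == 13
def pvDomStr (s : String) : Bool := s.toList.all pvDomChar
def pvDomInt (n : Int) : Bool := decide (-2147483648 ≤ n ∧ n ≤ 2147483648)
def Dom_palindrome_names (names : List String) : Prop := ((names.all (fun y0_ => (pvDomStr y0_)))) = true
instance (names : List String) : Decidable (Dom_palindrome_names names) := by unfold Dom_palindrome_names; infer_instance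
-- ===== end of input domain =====

-- B replaces A's reversed-string construction with a two-pointer inward scan that
-- early-exits on the first mismatch (objective: idiomatic); same return value.

-- ===== PORT A =====
-- the 'while index >= 0' loop building reversed_name
def pvRevLoop (s : List Char) (index : Int) (acc : List Char) : List Char :=
  if _h : 0 ≤ index then
    pvRevLoop s (index - 1) (acc ++ [PySem.List.pyGetD s index ' '])
  else acc
termination_by (index + 1).toNat
decreasing_by omega

def palindrome_names (names : List String) : List String :=
  names.foldl (fun name_list name =>
    let lower_name := (PySem.Str.lower name).toList
    let reversed_name := pvRevLoop lower_name ((lower_name.length : Int) - 1) []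
    if lower_name == reversed_name then name_list ++ [name] else name_list) []

-- ===== PORT B =====
-- the 'while i < j' two-pointer loop of is_pal, with early return on mismatch
def pvIsPal (s : List Char) (i j : Int) : Bool :=
  if _h : i < j then
    if PySem.List.pyGetD s i ' ' ≠ PySem.List.pyGetD s j ' ' then false
    else pvIsPal s (i + 1) (j - 1)
  else true
termination_by (j - i).toNat
decreasing_by omega

def palindrome_names_alt (names : List String) : List String :=
  names.filter (fun name =>
    let low := (PySem.Str.lower name).toList
    pvIsPal low 0 ((low.length : Int) - 1))

-- ===== PRECONDITION & SPEC =====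
def Spec_palindrome_names (names : List String) (out : List String) : Prop := out = palindrome_names_alt names
instance (names : List String) (out : List String) : Decidable (Spec_palindrome_names names out) := by unfold Spec_palindrome_names; infer_instance

-- ===== CLAIM (what is proved, stated in full; the proofs are below) =====
def Claim_equal_palindrome_names : Prop := ∀ (names : List String), Dom_palindrome_names names → Spec_palindrome_names names (palindrome_names names)

-- ===== LEMMAS AND PROOFS =====

theorem pvRevLoop_take (s : List Char) (k : Nat) (acc : List Char) (hk : k ≤ s.length) :
    pvRevLoop s ((k : Int) - 1) acc = acc ++ (s.take k).reverse := by
  induction k generalizing acc with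
  | zero => rw [pvRevLoop]; simp
  | succ n ih =>
    rw [pvRevLoop]
    have h0 : (0 : Int) ≤ (n + 1 : Nat) - 1 := by omega
    rw [dif_pos h0]
    have hlt : n < s.length := by omega
    have : ((n + 1 : Nat) : Int) - 1 = (n : Int) := by omega
    rw [this]
    have hget : PySem.List.pyGetD s (n : Int) ' ' = s[n] :=
      PySem.List.pyGetD_ofNat s n ' ' hlt
    have : ((n : Int)) - 1 + 1 = (n : Int) := by omega
    rw [show ((n : Int) - 1) = (n : Int) - 1 from rfl]
    rw [ih (acc ++ [PySem.List.pyGetD s (↑n) ' ']) (by omega)]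
    rw [hget]
    have htake : s.take (n + 1) = s.take n ++ [s[n]] := by
      rw [List.take_add_one, List.getElem?_eq_getElem hlt]; rfl
    rw [htake, List.reverse_append]
    simp

theorem pvRevLoop_reverse (s : List Char) :
    pvRevLoop s ((s.length : Int) - 1) [] = s.reverse := by
  simpa using pvRevLoop_take s s.length [] le_rfl

theorem pvIsPal_iff (s : List Char) (i j : Int) (hi : 0 ≤ i) (hj : j < s.length) :
    pvIsPal s i j = true ↔
      ∀ k : Int, i ≤ k → k ≤ j →
        PySem.List.pyGetD s k ' ' = PySem.List.pyGetD s (i + j - k) ' ' := by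
  induction i, j using pvIsPal.induct s with
  | case1 i j h hne =>
    -- mismatch branch: low[i] ≠ low[j] → false
    rw [pvIsPal, dif_pos h, if_pos hne]
    constructor
    · intro hf; simp at hf
    · intro hall
      have := hall i le_rfl (by omega)
      rw [show i + j - i = j by omega] at this
      exact absurd this hne
  | case2 i j h hne ih =>
    rw [pvIsPal, dif_pos h, if_neg hne]
    push Not at hne
    rw [ih (by omega) (by omega)]
    constructor
    · intro hall k hik hkj
      by_cases hki : k = i
      · subst hki; simpa using hne
      · by_cases hkj' : k = j
        · subst hkj'; simpa using hne.symm
        · have := hall k (by omega) (by omega)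
          have harith : i + 1 + (j - 1) - k = i + j - k := by omega
          rwa [harith] at this
    · intro hall k hik hkj
      have := hall k (by omega) (by omega)
      have harith : i + 1 + (j - 1) - k = i + j - k := by omega
      rwa [harith]
  | case3 i j h =>
    rw [pvIsPal, dif_neg h]
    simp only [true_iff]
    intro k hik hkj
    have hk : k = i := by omega
    have hk2 : i = j := by omega
    subst hk; subst hk2
    congr 1; omega

theorem pal_check_eq (s : List Char) :
    (s == s.reverse) = pvIsPal s 0 ((s.length : Int) - 1) := by
  by_cases hpal : pvIsPal s 0 ((s.length : Int) - 1) = true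
  · rw [hpal, beq_iff_eq]
    rw [pvIsPal_iff s 0 _ le_rfl (by omega)] at hpal
    apply List.ext_getElem (by simp)
    intro n h1 h2
    have hn : n < s.length := h1
    have := hpal (n : Int) (by omega) (by omega)
    rw [PySem.List.pyGetD_eq_getElem s ' ' (by omega) (by omega),
        PySem.List.pyGetD_eq_getElem s ' ' (by omega) (by omega)] at this
    rw [List.getElem_reverse]
    convert this using 2
    all_goals omega
  · rw [eq_false_of_ne_true hpal, beq_eq_false_iff_ne]
    intro heq
    apply hpal
    rw [pvIsPal_iff s 0 _ le_rfl (by omega)]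
    intro k h0k hk
    have hklen : k < (s.length : Int) := by omega
    have hrev : ∀ m (h : m < s.length), s[m] = s[s.length - 1 - m]'(by omega) := by
      intro m h
      have hq : s[m]? = s[s.length - 1 - m]? := by
        conv_lhs => rw [heq]
        exact List.getElem?_reverse (by simpa using h)
      rw [List.getElem?_eq_getElem h, List.getElem?_eq_getElem (by omega)] at hq
      exact Option.some_injective _ hq
    rw [PySem.List.pyGetD_eq_getElem s ' ' h0k hklen,
        PySem.List.pyGetD_eq_getElem s ' ' (by omega) (by omega)]
    have := hrev k.toNat (by omega)
    convert this using 2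
    omega

-- ===== VERDICT (by name: the statement is the Claim_ definition above) =====
theorem palindrome_names_spec : Claim_equal_palindrome_names := by
  intro names _
  show palindrome_names names = palindrome_names_alt names
  unfold palindrome_names palindrome_names_alt
  rw [PySem.List.foldl_append_if_eq_filter]
  simp only [List.nil_append]
  apply List.filter_congr
  intro name _
  simp only [pvRevLoop_reverse, pal_check_eq]
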